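-- pv_equiv track=rewrite | github.com/felipedumer/some_codesignal | 10.minOccurances.py | count_min_occurrences
-- ===== SOURCE A (Python) =====
-- def count_min_occurrences(nums):
--     if not nums:
--         return 0
--
--     min_value = nums[0]
--     min_count = 1
--
--     for num in nums[1:]:
--         if num < min_value:
--             min_value = num
--             min_count = 1
--         elif num == min_value:
--             min_count += 1
--
--     return min_count
-- ===== SOURCE B (Python) =====
-- def count_min_occurrences(nums):
--     return 0 if not nums else nums.count(min(nums))
-- ===== Notes on version B (the rewrite author's own statement) =====
-- stated objective: simpler
-- what changed: Replaces the single fused pass that updates (min_value, min_count) together with two builtin passes: compute min(nums) once, then count its occurrences with list.count, guarding the empty list that A returns 0 for.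
import Mathlib
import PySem

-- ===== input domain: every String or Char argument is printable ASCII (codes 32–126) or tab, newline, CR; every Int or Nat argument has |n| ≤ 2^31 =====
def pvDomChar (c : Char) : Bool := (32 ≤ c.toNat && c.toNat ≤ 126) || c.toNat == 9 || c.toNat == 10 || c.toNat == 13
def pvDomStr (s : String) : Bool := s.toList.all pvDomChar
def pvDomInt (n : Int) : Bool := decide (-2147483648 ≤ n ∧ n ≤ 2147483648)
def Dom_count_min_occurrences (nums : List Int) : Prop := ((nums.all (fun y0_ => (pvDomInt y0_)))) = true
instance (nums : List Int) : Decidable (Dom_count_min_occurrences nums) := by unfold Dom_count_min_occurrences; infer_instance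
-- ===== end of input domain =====

-- ===== PORT A =====
-- B replaces A's fused min/count loop by two builtin passes (min, then count); simpler.
def count_min_occurrences (nums : List Int) : Int :=
  match nums with
  | [] => 0
  | x :: t =>
    (t.foldl (fun (p : Int × Int) num =>
        if num < p.1 then (num, 1)
        else if num == p.1 then (p.1, p.2 + 1)
        else p) (x, 1)).2

-- ===== PORT B =====
def count_min_occurrences_alt (nums : List Int) : Int :=
  match PySem.List.min? nums (fun y => y) with
  | none => 0
  | some m => (PySem.List.count nums m : Int)

-- ===== PRECONDITION & SPEC =====
def Spec_count_min_occurrences (nums : List Int) (out : Int) : Prop := out = count_min_occurrences_alt nums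
instance (nums : List Int) (out : Int) : Decidable (Spec_count_min_occurrences nums out) := by unfold Spec_count_min_occurrences; infer_instance

-- ===== CLAIM (what is proved, stated in full; the proofs are below) =====
def Claim_equal_count_min_occurrences : Prop := ∀ (nums : List Int), Dom_count_min_occurrences nums → Spec_count_min_occurrences nums (count_min_occurrences nums)

-- ===== LEMMAS AND PROOFS =====

lemma pvFoldlMin_le (t : List Int) (x : Int) : t.foldl min x ≤ x := by
  induction t generalizing x with
  | nil => simp
  | cons a t ih => exact le_trans (ih (min x a)) (min_le_left _ _)

lemma pvLoopA (t : List Int) (mv mc : Int) :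
    t.foldl (fun (p : Int × Int) num =>
        if num < p.1 then (num, 1)
        else if num == p.1 then (p.1, p.2 + 1)
        else p) (mv, mc)
    = (t.foldl min mv,
       if t.foldl min mv < mv then (t.count (t.foldl min mv) : Int)
       else mc + (t.count mv : Int)) := by
  induction t generalizing mv mc with
  | nil => simp
  | cons a t ih =>
    simp only [List.foldl_cons]
    by_cases h1 : a < mv
    · simp only [if_pos h1]
      rw [ih a 1]
      have hmin : min mv a = a := min_eq_right (le_of_lt h1)
      rw [hmin]
      have hle : t.foldl min a ≤ a := pvFoldlMin_le t a
      have hlt : t.foldl min a < mv := lt_of_le_of_lt hle h1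
      rw [if_pos hlt]
      by_cases h2 : t.foldl min a < a
      · have hne : a ≠ t.foldl min a := by omega
        rw [if_pos h2]
        simp [List.count_cons]
        omega
      · have heq : t.foldl min a = a := le_antisymm hle (not_lt.mp h2)
        rw [if_neg h2, heq]
        simp
        omega
    · rw [if_neg h1]
      by_cases h2 : a == mv
      · simp only [if_pos h2]
        rw [ih mv (mc + 1)]
        have heq : a = mv := by simpa using h2
        have hmin : min mv a = mv := by omega
        rw [hmin]
        by_cases h3 : t.foldl min mv < mv
        · rw [if_pos h3, if_pos h3]
          have hne : a ≠ t.foldl min mv := by omega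
          simp [List.count_cons]
          omega
        · rw [if_neg h3, if_neg h3]
          simp [heq]
          omega
      · simp only [if_neg h2]
        rw [ih mv mc]
        have hne : a ≠ mv := by simpa using h2
        have hgt : mv < a := by
          rcases lt_trichotomy a mv with h | h | h
          · exact absurd h h1
          · exact absurd h hne
          · exact h
        have hmin : min mv a = mv := by omega
        rw [hmin]
        by_cases h3 : t.foldl min mv < mv
        · rw [if_pos h3, if_pos h3]
          have hle : t.foldl min mv ≤ mv := pvFoldlMin_le t mv
          have hne2 : a ≠ t.foldl min mv := by omega
          simp [List.count_cons]
          omega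
        · rw [if_neg h3, if_neg h3]
          simp [List.count_cons]
          omega

-- ===== VERDICT (by name: the statement is the Claim_ definition above) =====
theorem count_min_occurrences_spec : Claim_equal_count_min_occurrences := by
  intro nums _
  unfold Spec_count_min_occurrences count_min_occurrences count_min_occurrences_alt
  match nums with
  | [] => simp [PySem.List.min?]
  | x :: t =>
    rw [PySem.List.min?_id_cons]
    simp only [pvLoopA]
    rw [PySem.List.count_eq]
    have hle : t.foldl min x ≤ x := pvFoldlMin_le t x
    by_cases h : t.foldl min x < x
    · have hne : x ≠ t.foldl min x := by omega
      rw [if_pos h]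
      simp [hne]
    · have heq : t.foldl min x = x := le_antisymm hle (not_lt.mp h)
      rw [if_neg h, heq]
      simp
      ring
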